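-- pv_equiv track=rewrite | github.com/Mahishashemirani/CS50 | test_plates/plates.py | check_numbers_at_end
-- ===== SOURCE A (Python) =====
-- def check_numbers_at_end(s):
--
--     for i in range(len(s)):
--         if s[i].isdigit():
--
--             if not s[i:].isdigit():
--                 return False
--
--             if s[i] == '0':
--                 return False
--             break
--     return True
-- ===== SOURCE B (Python) =====
-- def check_numbers_at_end(s):
--     # Scan from the right for the maximal trailing digit run, then check the prefix.
--     j = len(s)
--     while j > 0 and s[j - 1].isdigit():
--         j -= 1
--     if any(c.isdigit() for c in s[:j]):
--         return False
--     if j < len(s) and s[j] == '0':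
--         return False
--     return True
-- ===== Notes on version B (the rewrite author's own statement) =====
-- stated objective: alternative
-- what changed: B scans from the right to find the maximal trailing digit run, then separately checks the prefix for digits and the run's first character for a leading zero, instead of A's left-to-right search for the first digit plus an isdigit() check of the whole remaining slice.
import Mathlib
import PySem

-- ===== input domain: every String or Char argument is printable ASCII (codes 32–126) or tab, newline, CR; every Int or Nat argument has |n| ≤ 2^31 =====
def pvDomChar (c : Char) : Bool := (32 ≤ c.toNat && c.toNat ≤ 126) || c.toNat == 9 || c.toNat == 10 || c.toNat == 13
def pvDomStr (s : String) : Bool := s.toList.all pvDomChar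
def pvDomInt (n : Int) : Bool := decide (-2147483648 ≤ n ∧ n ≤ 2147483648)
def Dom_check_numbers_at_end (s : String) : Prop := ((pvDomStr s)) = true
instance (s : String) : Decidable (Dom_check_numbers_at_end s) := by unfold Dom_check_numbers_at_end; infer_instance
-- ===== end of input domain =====

-- B locates the maximal trailing digit run by scanning from the right and then checks the
-- prefix separately, instead of A's left-to-right search for the first digit; same cost,
-- different decomposition ("alternative").

-- ===== PORT A =====
-- A's for-loop with early returns and break: recursion over the remaining suffix s[i:].
def checkLoopA : List Char → Bool
  | [] => true
  | c :: r =>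
    if PySem.Chars.isdigit c then
      if !PySem.Chars.strIsdigit (c :: r) then false
      else if c = '0' then false
      else true
    else checkLoopA r

def check_numbers_at_end (s : String) : Bool := checkLoopA s.toList

-- ===== PORT B =====
-- Source B's while loop walks j down from len(s) while s[j-1] is a digit; over the reversed
-- list that is counting the leading digit run, and j = len - that count.
def digitRunLen : List Char → Nat
  | [] => 0
  | c :: r => if PySem.Chars.isdigit c then 1 + digitRunLen r else 0

def check_numbers_at_end_alt (s : String) : Bool :=
  let cs := s.toList
  let j := cs.length - digitRunLen cs.reverse
  if (cs.take j).any PySem.Chars.isdigit then false       -- any(c.isdigit() for c in s[:j])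
  else if j < cs.length ∧ (cs.drop j).headD ' ' = '0' then false  -- j < len(s) and s[j] is a leading zero
  else true

-- ===== PRECONDITION & SPEC =====
def Spec_check_numbers_at_end (s : String) (out : Bool) : Prop := out = check_numbers_at_end_alt s
instance (s : String) (out : Bool) : Decidable (Spec_check_numbers_at_end s out) := by unfold Spec_check_numbers_at_end; infer_instance

-- ===== CLAIM (what is proved, stated in full; the proofs are below) =====
def Claim_equal_check_numbers_at_end : Prop := ∀ (s : String), Dom_check_numbers_at_end s → Spec_check_numbers_at_end s (check_numbers_at_end s)

-- ===== LEMMAS AND PROOFS =====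

-- check_numbers_at_end_alt on the list side, for the induction.
def Bfun (cs : List Char) : Bool :=
  let j := cs.length - digitRunLen cs.reverse
  if (cs.take j).any PySem.Chars.isdigit then false
  else if j < cs.length ∧ (cs.drop j).headD ' ' = '0' then false
  else true


theorem digitRunLen_le (xs : List Char) : digitRunLen xs ≤ xs.length := by
  induction xs with
  | nil => simp [digitRunLen]
  | cons c r ih => simp only [digitRunLen, List.length_cons]; split <;> omega

theorem digitRunLen_eq_len (xs : List Char) :
    (digitRunLen xs = xs.length) ↔ xs.all PySem.Chars.isdigit = true := by
  induction xs with
  | nil => simp [digitRunLen]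
  | cons c r ih =>
    have := digitRunLen_le r
    simp only [digitRunLen, List.length_cons, List.all_cons, Bool.and_eq_true]
    split
    · rename_i h; simp only [h, true_and]; rw [← ih]; omega
    · rename_i h; simp [h]

theorem digitRunLen_append (xs ys : List Char) :
    digitRunLen (xs ++ ys) =
      if digitRunLen xs = xs.length then xs.length + digitRunLen ys else digitRunLen xs := by
  induction xs with
  | nil => simp [digitRunLen]
  | cons x xs ih =>
    have := digitRunLen_le xs
    by_cases h : PySem.Chars.isdigit x = true
    · simp only [List.cons_append, digitRunLen, h, if_true, ih, List.length_cons]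
      by_cases h2 : digitRunLen xs = xs.length
      · rw [if_pos h2, if_pos (by omega)]; omega
      · rw [if_neg h2, if_neg (by omega)]
    · simp only [List.cons_append, digitRunLen, h, Bool.false_eq_true, if_false, List.length_cons]
      rw [if_neg (by omega)]

theorem digitRunLen_rev_cons (c : Char) (r : List Char) :
    digitRunLen (c :: r).reverse =
      if r.all PySem.Chars.isdigit = true then r.length + digitRunLen [c]
      else digitRunLen r.reverse := by
  rw [List.reverse_cons, digitRunLen_append]
  have h1 : (digitRunLen r.reverse = r.reverse.length) ↔ r.all PySem.Chars.isdigit = true := by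
    rw [digitRunLen_eq_len]; simp
  by_cases h : r.all PySem.Chars.isdigit = true
  · rw [if_pos (h1.mpr h), if_pos h]; simp
  · rw [if_neg (fun hh => h (h1.mp hh)), if_neg h]

theorem loop_eq (cs : List Char) : checkLoopA cs = Bfun cs := by
  induction cs with
  | nil => rfl
  | cons c r ih =>
    have hle : digitRunLen r.reverse ≤ r.length := by
      have := digitRunLen_le r.reverse; simpa using this
    have hrev := digitRunLen_rev_cons c r
    by_cases hc : PySem.Chars.isdigit c = true
    · by_cases hall : r.all PySem.Chars.isdigit = true
      · rw [if_pos hall] at hrev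
        have ht : digitRunLen (c :: r).reverse = r.length + 1 := by
          rw [hrev]; simp [digitRunLen, hc]
        simp only [Bfun, List.length_cons, ht, Nat.sub_self, List.take_zero, List.any_nil,
          Bool.false_eq_true, if_false, List.drop_zero, List.headD_cons]
        have hstr : PySem.Chars.strIsdigit (c :: r) = true := by
          simp [PySem.Chars.strIsdigit, hc, hall]
        simp only [checkLoopA, hc, if_true, hstr, Bool.not_true, Bool.false_eq_true, if_false]
        by_cases h0 : c = '0'
        · rw [if_pos h0, if_pos ⟨by omega, h0⟩]
        · rw [if_neg h0, if_neg (by rintro ⟨-, h⟩; exact h0 h)]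
      · rw [if_neg hall] at hrev
        have hstr : PySem.Chars.strIsdigit (c :: r) = false := by
          simp [PySem.Chars.strIsdigit, hc, hall]
        simp only [checkLoopA, hc, if_true, hstr, Bool.not_false, if_true]
        have hj : r.length + 1 - digitRunLen (c :: r).reverse
            = (r.length - digitRunLen r.reverse) + 1 := by rw [hrev]; omega
        simp only [Bfun, List.length_cons, hj, List.take_succ_cons, List.any_cons, hc,
          Bool.true_or, if_true]
    · have hA : checkLoopA (c :: r) = checkLoopA r := by simp [checkLoopA, hc]
      rw [hA, ih]
      by_cases hall : r.all PySem.Chars.isdigit = true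
      · rw [if_pos hall] at hrev
        have htr : digitRunLen r.reverse = r.length := by
          have := (digitRunLen_eq_len r.reverse).mpr (by simpa using hall)
          simpa using this
        have ht : digitRunLen (c :: r).reverse = r.length := by
          rw [hrev]; simp [digitRunLen, hc]
        have hj : r.length + 1 - digitRunLen (c :: r).reverse = 1 := by rw [ht]; omega
        have hjr : r.length - digitRunLen r.reverse = 0 := by omega
        simp only [Bfun, List.length_cons, hj, hjr, List.take_succ_cons, List.take_zero,
          List.any_cons, List.any_nil, hc, Bool.false_eq_true, Bool.or_false,
          if_false, List.drop_succ_cons, List.drop_zero]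
        have hcond : (1 < r.length + 1) ↔ (0 < r.length) := by omega
        simp only [hcond]
      · rw [if_neg hall] at hrev
        have hj : r.length + 1 - digitRunLen (c :: r).reverse
            = (r.length - digitRunLen r.reverse) + 1 := by rw [hrev]; omega
        simp only [Bfun, List.length_cons, hj, List.take_succ_cons, List.any_cons, hc,
          Bool.false_or, List.drop_succ_cons]
        have hcond : (r.length - digitRunLen r.reverse + 1 < r.length + 1)
            ↔ (r.length - digitRunLen r.reverse < r.length) := by omega
        simp only [hcond]

theorem alt_eq_Bfun (s : String) : check_numbers_at_end_alt s = Bfun s.toList := rfl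

-- ===== VERDICT (by name: the statement is the Claim_ definition above) =====
theorem check_numbers_at_end_spec : Claim_equal_check_numbers_at_end := by
  intro s _
  unfold Spec_check_numbers_at_end check_numbers_at_end
  rw [alt_eq_Bfun]
  exact loop_eq s.toList
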